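-- pv_equiv track=rewrite | github.com/denisunderonov/Algorithms3SEM | ЛР8/a.py | pure_delete_all_from_ordered
-- ===== SOURCE A (Python) =====
-- def binary_search_first(arr, target):
--     """Бинарный поиск - находит ПЕРВОЕ вхождение в отсортированном массиве"""
--     left, right = 0, len(arr) - 1
--     result = -1
--
--     while left <= right:
--         mid = (left + right) // 2
--         if arr[mid] == target:
--             result = mid
--             right = mid - 1  # Продолжаем искать слева
--         elif arr[mid] < target:
--             left = mid + 1
--         else:
--             right = mid - 1
--     return result
--
-- def pure_delete_all_from_ordered(arr, element):
--     """Чистое удаление ВСЕХ вхождений из упорядоченного массива"""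
--     # Находим все индексы для удаления
--     first_index = binary_search_first(arr, element)
--     if first_index == -1:
--         return arr
--
--     indices = []
--     i = first_index
--     while i < len(arr) and arr[i] == element:
--         indices.append(i)
--         i += 1
--
--     # Удаляем с конца, чтобы индексы не сдвигались
--     for index in sorted(indices, reverse=True):
--         del arr[index]
--
--     return arr
-- ===== SOURCE B (Python) =====
-- def pure_delete_all_from_ordered(arr, element):
--     """Recursive Option-style binary search for the first hit, then splice out the
--     whole run of equal elements with a single slice assignment (mutates arr in place,
--     like the original)."""
--     def first_hit(left, right):
--         if left > right:
--             return None
--         mid = (left + right) // 2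
--         if arr[mid] == element:
--             r = first_hit(left, mid - 1)
--             return mid if r is None else r
--         if arr[mid] < element:
--             return first_hit(mid + 1, right)
--         return first_hit(left, mid - 1)
--
--     i = first_hit(0, len(arr) - 1)
--     if i is None:
--         return arr
--     j = i
--     while j < len(arr) and arr[j] == element:
--         j += 1
--     arr[:] = arr[:i] + arr[j:]
--     return arr
-- ===== Notes on version B (the rewrite author's own statement) =====
-- stated objective: alternative
-- what changed: Replaces A's accumulator-based binary-search loop by a recursive Option-returning search for the first hit, and replaces A's build-index-list / reverse-sort / per-index del loop (each del shifting the tail) by one slice splice of the whole run.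
import Mathlib
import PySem

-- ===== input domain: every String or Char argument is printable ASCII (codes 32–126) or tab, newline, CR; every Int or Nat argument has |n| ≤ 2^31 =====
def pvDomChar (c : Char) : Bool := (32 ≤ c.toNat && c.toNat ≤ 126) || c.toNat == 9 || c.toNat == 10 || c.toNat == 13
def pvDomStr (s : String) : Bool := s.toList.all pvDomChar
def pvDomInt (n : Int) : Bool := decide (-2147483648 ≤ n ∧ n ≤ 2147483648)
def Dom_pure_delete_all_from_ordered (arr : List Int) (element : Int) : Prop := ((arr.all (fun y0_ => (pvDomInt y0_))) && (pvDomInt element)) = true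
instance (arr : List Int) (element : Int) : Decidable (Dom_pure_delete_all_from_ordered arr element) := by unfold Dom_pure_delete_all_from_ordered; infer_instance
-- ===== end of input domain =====

-- B replaces A's accumulator-based binary-search loop by a recursive Option-returning
-- search for the first hit, and A's index-list + reverse-sort + per-index deletes by one
-- slice splice. Both Pythons mutate `arr` in place; the equivalence proved here is about
-- the return value.

-- ===== PORT A =====
-- while-loop of binary_search_first; `none` branch is unreachable from binary_search_first
-- (mid always in range there) and returns `result` as a harmless total default.
def binarySearchFirstLoop (arr : List Int) (target left right result : Int) : Int :=
  if h : left ≤ right then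
    let mid := PySem.Int.floordiv (left + right) 2
    match PySem.List.pyGet? arr mid with
    | none => result
    | some v =>
      if v = target then binarySearchFirstLoop arr target left (mid - 1) mid
      else if v < target then binarySearchFirstLoop arr target (mid + 1) right result
      else binarySearchFirstLoop arr target left (mid - 1) result
  else result
termination_by (right + 1 - left).toNat
decreasing_by
  all_goals
    have hb := PySem.Int.floordiv_two_mid_bounds h
    omega

def binary_search_first (arr : List Int) (target : Int) : Int :=
  binarySearchFirstLoop arr target 0 ((arr.length : Int) - 1) (-1)

-- the `while i < len(arr) and arr[i] == element: indices.append(i)` loop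
def collectRun (arr : List Int) (element i : Int) (acc : List Int) : List Int :=
  if h : i < (arr.length : Int) then
    match PySem.List.pyGet? arr i with
    | none => acc        -- unreachable from the entry point (there 0 ≤ i < len)
    | some v =>
      if v = element then collectRun arr element (i + 1) (acc ++ [i]) else acc
  else acc
termination_by ((arr.length : Int) - i).toNat
decreasing_by omega

def pure_delete_all_from_ordered (arr : List Int) (element : Int) : List Int :=
  let first_index := binary_search_first arr element
  if first_index = -1 then arr
  else
    let indices := collectRun arr element first_index []
    (PySem.List.sorted indices (fun x => x) true).foldl
      (fun a index =>
        match PySem.List.pop? a index with   -- `del a[index]`; in range whenever A runs it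
        | some r => r.2
        | none => a) arr

-- ===== PORT B =====
-- B's recursive `first_hit`; `none` on the pyGet? miss is unreachable from the entry
-- point (mid always in range there).
def firstHit (arr : List Int) (element left right : Int) : Option Int :=
  if h : left ≤ right then
    let mid := PySem.Int.floordiv (left + right) 2
    match PySem.List.pyGet? arr mid with
    | none => none
    | some v =>
      if v = element then
        match firstHit arr element left (mid - 1) with
        | none => some mid
        | some r => some r
      else if v < element then firstHit arr element (mid + 1) right
      else firstHit arr element left (mid - 1)
  else none
termination_by (right + 1 - left).toNat
decreasing_by
  all_goals
    have hb := PySem.Int.floordiv_two_mid_bounds h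
    omega

-- the `while j < len(arr) and arr[j] == element: j += 1` loop of B
def scanEnd (arr : List Int) (element j : Int) : Int :=
  if h : j < (arr.length : Int) then
    match PySem.List.pyGet? arr j with
    | none => j          -- unreachable from the entry point (there 0 ≤ j < len)
    | some v => if v = element then scanEnd arr element (j + 1) else j
  else j
termination_by ((arr.length : Int) - j).toNat
decreasing_by omega

def pure_delete_all_from_ordered_alt (arr : List Int) (element : Int) : List Int :=
  match firstHit arr element 0 ((arr.length : Int) - 1) with
  | none => arr
  | some i =>
    let j := scanEnd arr element i
    -- return value of `arr[:] = arr[:i] + arr[j:]; return arr`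
    PySem.List.slice arr none (some i) ++ PySem.List.slice arr (some j) none

-- ===== PRECONDITION & SPEC =====
def Spec_pure_delete_all_from_ordered (arr : List Int) (element : Int) (out : List Int) : Prop := out = pure_delete_all_from_ordered_alt arr element
instance (arr : List Int) (element : Int) (out : List Int) : Decidable (Spec_pure_delete_all_from_ordered arr element out) := by unfold Spec_pure_delete_all_from_ordered; infer_instance

-- ===== CLAIM (what is proved, stated in full; the proofs are below) =====
def Claim_equal_pure_delete_all_from_ordered : Prop := ∀ (arr : List Int) (element : Int), Dom_pure_delete_all_from_ordered arr element → Spec_pure_delete_all_from_ordered arr element (pure_delete_all_from_ordered arr element)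

-- ===== LEMMAS AND PROOFS =====

-- A's accumulator loop computes B's recursive search with the accumulator as default
theorem bsfLoop_eq_firstHit (arr : List Int) (e : Int) : ∀ (l r res : Int),
    binarySearchFirstLoop arr e l r res = (firstHit arr e l r).getD res := by
  intro l r res
  induction l, r, res using binarySearchFirstLoop.induct arr e with
  | case1 l r res h mid hnone =>
    have hmid : mid = PySem.Int.floordiv (l + r) 2 := rfl
    rw [binarySearchFirstLoop, firstHit]
    simp only [dif_pos h, ← hmid, hnone, Option.getD_none]
  | case2 l r res h mid hsome ih =>
    have hmid : mid = PySem.Int.floordiv (l + r) 2 := rfl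
    rw [binarySearchFirstLoop, firstHit]
    simp only [dif_pos h, ← hmid, hsome, if_pos rfl]
    rw [ih]
    cases firstHit arr e l (mid - 1) <;> simp
  | case3 l r res h mid v hsome hne hlt ih =>
    have hmid : mid = PySem.Int.floordiv (l + r) 2 := rfl
    rw [binarySearchFirstLoop, firstHit]
    simp only [dif_pos h, ← hmid, hsome, if_neg hne, if_pos hlt]
    exact ih
  | case4 l r res h mid v hsome hne hge ih =>
    have hmid : mid = PySem.Int.floordiv (l + r) 2 := rfl
    rw [binarySearchFirstLoop, firstHit]
    simp only [dif_pos h, ← hmid, hsome, if_neg hne, if_neg hge]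
    exact ih
  | case5 l r res h =>
    rw [binarySearchFirstLoop, firstHit, dif_neg h, dif_neg h, Option.getD_none]

-- a hit returned by B's search is an in-range index
theorem firstHit_range (arr : List Int) (e : Int) : ∀ (l r : Int),
    0 ≤ l → r < (arr.length : Int) →
    ∀ i, firstHit arr e l r = some i → 0 ≤ i ∧ i < (arr.length : Int) := by
  intro l r
  induction l, r using firstHit.induct arr e with
  | case1 l r h mid hnone =>
    intro _ _ i hi
    have hmid : mid = PySem.Int.floordiv (l + r) 2 := rfl
    rw [firstHit, dif_pos h] at hi
    simp only [← hmid, hnone] at hi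
    cases hi
  | case2 l r h mid hrec hsome ih =>
    intro hl hr i hi
    have hb := PySem.Int.floordiv_two_mid_bounds h
    have hmid : mid = PySem.Int.floordiv (l + r) 2 := rfl
    rw [firstHit, dif_pos h] at hi
    simp only [← hmid, hsome, if_pos rfl, hrec] at hi
    cases hi
    constructor <;> omega
  | case3 l r h mid r' hrec hsome ih =>
    intro hl hr i hi
    have hb := PySem.Int.floordiv_two_mid_bounds h
    have hmid : mid = PySem.Int.floordiv (l + r) 2 := rfl
    rw [firstHit, dif_pos h] at hi
    simp only [← hmid, hsome, if_pos rfl, hrec] at hi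
    cases hi
    exact ih hl (by omega) _ hrec
  | case4 l r h mid v hsome hne hlt ih =>
    intro hl hr i hi
    have hb := PySem.Int.floordiv_two_mid_bounds h
    have hmid : mid = PySem.Int.floordiv (l + r) 2 := rfl
    rw [firstHit, dif_pos h] at hi
    simp only [← hmid, hsome, if_neg hne, if_pos hlt] at hi
    exact ih (by omega) hr _ hi
  | case5 l r h mid v hsome hne hge ih =>
    intro hl hr i hi
    have hb := PySem.Int.floordiv_two_mid_bounds h
    have hmid : mid = PySem.Int.floordiv (l + r) 2 := rfl
    rw [firstHit, dif_pos h] at hi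
    simp only [← hmid, hsome, if_neg hne, if_neg hge] at hi
    exact ih hl (by omega) _ hi
  | case6 l r h =>
    intro _ _ i hi
    rw [firstHit, dif_neg h] at hi
    cases hi

-- the end of the scanned run lies between j and the length
theorem scanEnd_ge (arr : List Int) (e : Int) : ∀ (j : Int), j ≤ scanEnd arr e j := by
  intro j
  induction j using scanEnd.induct arr e with
  | case1 j h hnone => rw [scanEnd, dif_pos h, hnone]
  | case2 j h hsome ih =>
    rw [scanEnd, dif_pos h]
    simp [hsome]
    omega
  | case3 j h v hsome hne =>
    rw [scanEnd, dif_pos h]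
    simp only [hsome, if_neg hne]
    omega
  | case4 j h => rw [scanEnd, dif_neg h]

theorem scanEnd_le (arr : List Int) (e : Int) : ∀ (j : Int),
    j ≤ (arr.length : Int) → scanEnd arr e j ≤ (arr.length : Int) := by
  intro j
  induction j using scanEnd.induct arr e with
  | case1 j h hnone => intro _; rw [scanEnd, dif_pos h, hnone]; omega
  | case2 j h hsome ih =>
    intro _
    rw [scanEnd, dif_pos h]
    simp [hsome]
    exact ih (by omega)
  | case3 j h v hsome hne =>
    intro _
    rw [scanEnd, dif_pos h]
    simp only [hsome, if_neg hne]
    omega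
  | case4 j h => intro hj; rw [scanEnd, dif_neg h]; exact hj

-- A's index-collecting loop returns exactly the indices up to B's run end
theorem collectRun_eq (arr : List Int) (e : Int) : ∀ (j : Int) (acc : List Int),
    collectRun arr e j acc = acc ++ PySem.List.pyRange j (scanEnd arr e j) 1 := by
  intro j
  induction j using scanEnd.induct arr e with
  | case1 j h hnone =>
    intro acc
    rw [collectRun, dif_pos h, scanEnd, dif_pos h]
    simp only [hnone]
    rw [PySem.List.pyRange_one_eq_nil (by omega), List.append_nil]
  | case2 j h hsome ih =>
    intro acc
    rw [collectRun, dif_pos h]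
    simp [hsome]
    rw [ih]
    have hse : scanEnd arr e j = scanEnd arr e (j + 1) := by
      rw [scanEnd, dif_pos h]
      simp [hsome]
    rw [hse]
    conv_rhs => rw [PySem.List.pyRange_one_cons (by have := scanEnd_ge arr e (j + 1); omega)]
    simp
  | case3 j h v hsome hne =>
    intro acc
    rw [collectRun, dif_pos h, scanEnd, dif_pos h]
    simp only [hsome, if_neg hne]
    rw [PySem.List.pyRange_one_eq_nil (by omega), List.append_nil]
  | case4 j h =>
    intro acc
    rw [collectRun, dif_neg h, scanEnd, dif_neg h]
    rw [PySem.List.pyRange_one_eq_nil (by omega), List.append_nil]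

-- sorted(ascending range, reverse=True) is the corresponding descending range
theorem sortedRev_pyRange (a b : Int) :
    PySem.List.sorted (PySem.List.pyRange a b 1) (fun x => x) true =
      PySem.List.pyRange (b - 1) (a - 1) (-1) := by
  apply PySem.List.sorted_rev_eq_of_perm_of_pairwise_gt
  · have heq : PySem.List.pyRange (b - 1) (a - 1) (-1) =
        (PySem.List.pyRange a b 1).reverse := by
      rw [PySem.List.pyRange_neg_one_eq_reverse]
      congr 2 <;> omega
    rw [heq]
    exact List.reverse_perm _
  · rw [PySem.List.pyRange_neg_one_eq_reverse, List.pairwise_reverse]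
    exact (PySem.List.pairwise_lt_pyRange_one _ _).imp (fun h => h)

-- deleting the indices of ys back to front removes exactly ys
theorem delFold_spec : ∀ (ys xs zs : List Int),
    (PySem.List.pyRange ((xs.length : Int) + (ys.length : Int) - 1) ((xs.length : Int) - 1) (-1)).foldl
      (fun a index =>
        match PySem.List.pop? a index with
        | some r => r.2
        | none => a) (xs ++ ys ++ zs) = xs ++ zs := by
  intro ys
  induction ys using List.reverseRecOn with
  | nil =>
    intro xs zs
    rw [PySem.List.pyRange_neg_one_eq_nil (by simp)]
    simp
  | append_singleton ys' y ih =>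
    intro xs zs
    rw [PySem.List.pyRange_neg_one_cons (by simp)]
    rw [List.foldl_cons]
    have hidx : (xs.length : Int) + ((ys' ++ [y]).length : Int) - 1 = (((xs ++ ys').length : Nat) : Int) := by
      simp; omega
    have hlt : (xs ++ ys').length < (xs ++ (ys' ++ [y]) ++ zs).length := by simp
    have hpop : PySem.List.pop? (xs ++ (ys' ++ [y]) ++ zs) ((((xs ++ ys').length : Nat)) : Int) =
        some ((xs ++ (ys' ++ [y]) ++ zs)[(xs ++ ys').length], (xs ++ (ys' ++ [y]) ++ zs).eraseIdx (xs ++ ys').length) :=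
      PySem.List.pop?_natCast _ _ hlt
    rw [hidx, hpop]
    have herase : (xs ++ (ys' ++ [y]) ++ zs).eraseIdx (xs ++ ys').length = xs ++ ys' ++ zs := by
      have : xs ++ (ys' ++ [y]) ++ zs = (xs ++ ys') ++ ([y] ++ zs) := by simp
      rw [this, List.eraseIdx_append_of_length_le (le_refl _)]
      simp
    have harg : (((xs ++ ys').length : Nat) : Int) - 1 = (xs.length : Int) + (ys'.length : Int) - 1 := by
      push_cast [List.length_append]; ring
    rw [herase, harg]
    exact ih xs zs

-- deleting indices j-1 … i back to front removes the segment [i, j)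
theorem delFold_take_drop (arr : List Int) (i j : Nat) (hij : i ≤ j) (hj : j ≤ arr.length) :
    (PySem.List.pyRange ((j : Int) - 1) ((i : Int) - 1) (-1)).foldl
      (fun a index =>
        match PySem.List.pop? a index with
        | some r => r.2
        | none => a) arr = arr.take i ++ arr.drop j := by
  have harr : arr = arr.take i ++ (arr.drop i).take (j - i) ++ arr.drop j := by
    have hdd : arr.drop j = (arr.drop i).drop (j - i) := by
      rw [List.drop_drop]
      congr 1
      omega
    rw [List.append_assoc, hdd, List.take_append_drop, List.take_append_drop]
  have hxlen : (arr.take i).length = i := by simp; omega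
  have hylen : ((arr.drop i).take (j - i)).length = j - i := by
    simp
    omega
  have h1 : ((arr.take i).length : Int) + (((arr.drop i).take (j - i)).length : Int) - 1 =
      (j : Int) - 1 := by rw [hxlen, hylen]; omega
  have h2 : ((arr.take i).length : Int) - 1 = (i : Int) - 1 := by rw [hxlen]
  conv_lhs => rw [harr]
  rw [← h1, ← h2, delFold_spec ((arr.drop i).take (j - i)) (arr.take i) (arr.drop j)]

-- ===== VERDICT (by name: the statement is the Claim_ definition above) =====
theorem pure_delete_all_from_ordered_spec : Claim_equal_pure_delete_all_from_ordered := by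
  intro arr e _
  unfold Spec_pure_delete_all_from_ordered pure_delete_all_from_ordered pure_delete_all_from_ordered_alt
  have hbsf : binary_search_first arr e =
      (firstHit arr e 0 ((arr.length : Int) - 1)).getD (-1) :=
    bsfLoop_eq_firstHit arr e 0 ((arr.length : Int) - 1) (-1)
  cases hfh : firstHit arr e 0 ((arr.length : Int) - 1) with
  | none =>
    rw [hfh, Option.getD_none] at hbsf
    simp [hbsf]
  | some i =>
    have ⟨h0, hlen⟩ := firstHit_range arr e 0 ((arr.length : Int) - 1) (by omega) (by omega) i hfh
    rw [hfh, Option.getD_some] at hbsf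
    have hge := scanEnd_ge arr e i
    have hle := scanEnd_le arr e i (by omega)
    have hne : ¬ (i = -1) := by omega
    simp only [hbsf, collectRun_eq, List.nil_append, sortedRev_pyRange,
      PySem.List.slice_to arr h0,
      PySem.List.slice_from arr (show (0:Int) ≤ scanEnd arr e i by omega)]
    rw [if_neg hne]
    have hi : ((i.toNat : Nat) : Int) = i := by omega
    have hj : (((scanEnd arr e i).toNat : Nat) : Int) = scanEnd arr e i := by omega
    have hdel := delFold_take_drop arr i.toNat (scanEnd arr e i).toNat (by omega) (by omega)
    rw [hi, hj] at hdel
    exact hdel
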